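-- pv_equiv track=rewrite | github.com/B144319/B144319_Dissertation_2025 | interface_engineering_het.py | get_chain_boundaries
-- ===== SOURCE A (Python) =====
-- def get_chain_boundaries(chain_lengths):
--     chain_boundaries = {}
--     start = 1
--     for chain_id, length in chain_lengths.items():
--         end = start + length - 1
--         chain_boundaries[chain_id] = (start, end)
--         start = end + 1
--     return chain_boundaries
-- ===== SOURCE B (Python) =====
-- def get_chain_boundaries(chain_lengths):
--     # Pass 1: materialise the prefix-sum table of cumulative end positions.
--     ends = []
--     total = 0
--     for length in chain_lengths.values():
--         total += length
--         ends.append(total)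
--     # Pass 2: derive each chain's boundaries from its cumulative end.
--     chain_boundaries = {}
--     for (chain_id, length), end in zip(chain_lengths.items(), ends):
--         chain_boundaries[chain_id] = (end - length + 1, end)
--     return chain_boundaries
-- ===== Notes on version B (the rewrite author's own statement) =====
-- stated objective: alternative
-- what changed: Instead of threading a running start through one loop, B first materialises the prefix-sum table of cumulative ends in one pass and then derives (start, end) = (end - length + 1, end) per chain in a second pass over the zipped ids.
import Mathlib
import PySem

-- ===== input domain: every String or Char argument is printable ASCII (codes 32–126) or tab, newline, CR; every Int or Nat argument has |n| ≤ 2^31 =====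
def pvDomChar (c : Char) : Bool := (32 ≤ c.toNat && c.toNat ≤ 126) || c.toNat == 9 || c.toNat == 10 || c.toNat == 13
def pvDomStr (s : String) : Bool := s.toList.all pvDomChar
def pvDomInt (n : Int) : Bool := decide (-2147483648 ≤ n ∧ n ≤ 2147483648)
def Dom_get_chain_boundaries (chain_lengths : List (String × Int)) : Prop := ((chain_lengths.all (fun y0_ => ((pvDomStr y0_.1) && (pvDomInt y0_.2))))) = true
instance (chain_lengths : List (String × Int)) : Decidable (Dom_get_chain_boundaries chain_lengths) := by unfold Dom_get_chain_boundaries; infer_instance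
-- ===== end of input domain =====

-- B replaces the single loop threading a running start with a prefix-sum pass
-- building the table of cumulative ends, then a second pass deriving boundaries
-- (objective: alternative decomposition, same cost).


-- ===== PORT A =====
def get_chain_boundaries (chain_lengths : List (String × Int)) : List (String × Int × Int) :=
  (chain_lengths.foldl
    (fun (st : PySem.Dict String (Int × Int) × Int) p =>
      let e := st.2 + p.2 - 1
      (st.1.insert p.1 (st.2, e), e + 1))
    (PySem.Dict.empty, 1)).1.items

-- ===== PORT B =====
def get_chain_boundaries_alt (chain_lengths : List (String × Int)) : List (String × Int × Int) :=
  -- pass 1: prefix-sum table of cumulative ends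
  let ends := (chain_lengths.foldl
    (fun (st : List Int × Int) p => (st.1 ++ [st.2 + p.2], st.2 + p.2)) ([], 0)).1
  -- pass 2: derive boundaries from the table
  ((chain_lengths.zip ends).foldl
    (fun (d : PySem.Dict String (Int × Int)) pe =>
      d.insert pe.1.1 (pe.2 - pe.1.2 + 1, pe.2))
    PySem.Dict.empty).items

-- ===== PRECONDITION & SPEC =====
def Spec_get_chain_boundaries (chain_lengths : List (String × Int)) (out : List (String × Int × Int)) : Prop := out = get_chain_boundaries_alt chain_lengths
instance (chain_lengths : List (String × Int)) (out : List (String × Int × Int)) : Decidable (Spec_get_chain_boundaries chain_lengths out) := by unfold Spec_get_chain_boundaries; infer_instance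

-- ===== CLAIM (what is proved, stated in full; the proofs are below) =====
def Claim_equal_get_chain_boundaries : Prop := ∀ (chain_lengths : List (String × Int)), Dom_get_chain_boundaries chain_lengths → Spec_get_chain_boundaries chain_lengths (get_chain_boundaries chain_lengths)

-- ===== LEMMAS AND PROOFS =====

/-- The prefix-sum table of cumulative ends, starting from running total `t`. -/
def pvEnds (t : Int) : List (String × Int) → List Int
  | [] => []
  | p :: rest => (t + p.2) :: pvEnds (t + p.2) rest

lemma pvEnds_fold (l : List (String × Int)) (acc : List Int) (t : Int) :
    (l.foldl (fun (st : List Int × Int) p => (st.1 ++ [st.2 + p.2], st.2 + p.2)) (acc, t)).1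
      = acc ++ pvEnds t l := by
  induction l generalizing acc t with
  | nil => simp [pvEnds]
  | cons p rest ih => simp [List.foldl, pvEnds, ih]

lemma loopA_eq (l : List (String × Int)) (d : PySem.Dict String (Int × Int)) (s : Int) :
    (l.foldl
      (fun (st : PySem.Dict String (Int × Int) × Int) p =>
        let e := st.2 + p.2 - 1
        (st.1.insert p.1 (st.2, e), e + 1)) (d, s)).1
      = (l.zip (pvEnds (s - 1) l)).foldl
          (fun (d : PySem.Dict String (Int × Int)) pe =>
            d.insert pe.1.1 (pe.2 - pe.1.2 + 1, pe.2)) d := by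
  induction l generalizing d s with
  | nil => rfl
  | cons p rest ih =>
    simp only [List.foldl, pvEnds, List.zip_cons_cons]
    have h1 : s - 1 + p.2 - p.2 + 1 = s := by ring
    have h2 : s - 1 + p.2 = s + p.2 - 1 := by ring
    have h3 : s + p.2 - 1 + 1 - 1 = s - 1 + p.2 := by ring
    rw [h1, h2, ih, h3, ← h2]

-- ===== VERDICT (by name: the statement is the Claim_ definition above) =====
theorem get_chain_boundaries_spec : Claim_equal_get_chain_boundaries := by
  intro l _
  unfold Spec_get_chain_boundaries get_chain_boundaries get_chain_boundaries_alt
  rw [pvEnds_fold, List.nil_append, loopA_eq]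
  norm_num
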